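-- pv_equiv track=rewrite | github.com/Raffson/Sub-C-compiler | subCListener2.py | __customSplit
-- ===== SOURCE A (Python) =====
-- def __customSplit(string):
--     stringarr = []
--     bracketcount = 0
--     last = 0
--     for i in range(0, len(string)):
--         if( string[i] == ',' and bracketcount == 0 ):
--             if( last > 0 ):
--                 stringarr.append(string[last:i])
--             else:
--                 stringarr.append(string[last:i])
--             last = i+1
--         elif( string[i] == '{' ):
--             bracketcount += 1
--         elif( string[i] == '}' ):
--             bracketcount -= 1
--     stringarr.append(string[last:])
--     return stringarr
-- ===== SOURCE B (Python) =====
-- def __customSplit(string):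
--     # Split on every comma first, then merge consecutive fragments back together
--     # until the braces inside the pending group balance out ('{' count == '}' count).
--     parts = []
--     buf = []      # fragments of the pending (still unbalanced) group
--     bal = 0       # '{' minus '}' occurrences inside the pending group
--     for piece in string.split(','):
--         buf.append(piece)
--         bal += piece.count('{') - piece.count('}')
--         if bal == 0:
--             parts.append(','.join(buf))
--             buf = []
--     if buf:
--         parts.append(','.join(buf))
--     return parts
-- ===== Notes on version B (the rewrite author's own statement) =====
-- stated objective: alternative
-- what changed: A makes one character-by-character scan maintaining a running brace depth and a moving slice start; B never tracks a per-character depth: it splits the string on every comma with str.split and then merges consecutive fragments back (joining with ',') until the pending group's '{' count equals its '}' count, flushing each balanced group.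
import Mathlib
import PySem

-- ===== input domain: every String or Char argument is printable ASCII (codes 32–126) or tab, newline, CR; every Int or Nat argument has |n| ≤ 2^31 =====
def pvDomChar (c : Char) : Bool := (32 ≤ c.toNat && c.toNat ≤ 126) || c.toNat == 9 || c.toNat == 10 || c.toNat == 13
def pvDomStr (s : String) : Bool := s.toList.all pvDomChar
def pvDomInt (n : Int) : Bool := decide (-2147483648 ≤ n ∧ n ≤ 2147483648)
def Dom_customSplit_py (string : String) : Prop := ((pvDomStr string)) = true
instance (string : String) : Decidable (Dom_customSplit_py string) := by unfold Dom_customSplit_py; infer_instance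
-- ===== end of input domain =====

-- B replaces A's single character scan (running brace depth + moving slice start) by
-- split-on-every-comma followed by merging fragments until '{'/'}' counts balance;
-- objective: alternative algorithm, same cost.


-- ===== PORT A =====
-- loop body of A: comma at depth 0 → append slice and move `last`; else track braces
def aStep (s : List Char) (acc : List String × Int × Int) (i : Int) : List String × Int × Int :=
  match acc with
  | (arr, bc, last) =>
    if PySem.List.pyGet? s i = some ',' ∧ bc = 0 then
      (if last > 0 then arr ++ [String.ofList (PySem.List.slice s (some last) (some i))]
       else arr ++ [String.ofList (PySem.List.slice s (some last) (some i))], bc, i + 1)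
    else if PySem.List.pyGet? s i = some '{' then (arr, bc + 1, last)
    else if PySem.List.pyGet? s i = some '}' then (arr, bc - 1, last)
    else (arr, bc, last)

def customSplit_py (string : String) : List String :=
  let s := string.toList
  let st := (PySem.List.pyRange 0 (s.length : Int) 1).foldl (aStep s) ([], 0, 0)
  st.1 ++ [String.ofList (PySem.List.slice s (some st.2.2) none)]

-- ===== PORT B =====
-- loop body of B: stash the fragment, update the brace balance of the pending group,
-- flush the group (joined back with ',') when the balance is zero
def bStep (st : List (List Char) × List (List Char) × Int) (p : List Char) :
    List (List Char) × List (List Char) × Int :=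
  let buf' := st.2.1 ++ [p]
  let bal' := st.2.2 + ((PySem.Chars.count p ['{'] : Int) - (PySem.Chars.count p ['}'] : Int))
  if bal' = 0 then (st.1 ++ [PySem.Chars.join [','] buf'], [], 0) else (st.1, buf', bal')

-- trailing `if buf: parts.append(','.join(buf))`
def bFinish (st : List (List Char) × List (List Char) × Int) : List (List Char) :=
  if st.2.1 = [] then st.1 else st.1 ++ [PySem.Chars.join [','] st.2.1]

def customSplit_py_alt (string : String) : List String :=
  let pieces := PySem.Chars.splitOn string.toList [',']
  (bFinish (pieces.foldl bStep ([], [], 0))).map String.ofList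

-- ===== PRECONDITION & SPEC =====
def Spec_customSplit_py (string : String) (out : List String) : Prop := out = customSplit_py_alt string
instance (string : String) (out : List String) : Decidable (Spec_customSplit_py string out) := by unfold Spec_customSplit_py; infer_instance

-- ===== CLAIM (what is proved, stated in full; the proofs are below) =====
def Claim_equal_customSplit_py : Prop := ∀ (string : String), Dom_customSplit_py string → Spec_customSplit_py string (customSplit_py string)

-- ===== LEMMAS AND PROOFS =====

-- reference function both ports are reduced to: consume the characters once, keeping the
-- brace depth and the characters of the current segment
def segRef : List Char → Int → List Char → List (List Char)
  | [], _, cur => [cur]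
  | c :: t, bc, cur =>
    if c = ',' ∧ bc = 0 then cur :: segRef t 0 []
    else segRef t (bc + (if c = '{' then 1 else if c = '}' then -1 else 0)) (cur ++ [c])

theorem segRef_nil (bc : Int) (cur : List Char) : segRef [] bc cur = [cur] := rfl

theorem segRef_cons (c : Char) (t : List Char) (bc : Int) (cur : List Char) :
    segRef (c :: t) bc cur
      = if c = ',' ∧ bc = 0 then cur :: segRef t 0 []
        else segRef t (bc + (if c = '{' then 1 else if c = '}' then -1 else 0)) (cur ++ [c]) := rfl

theorem segRef_comma (t : List Char) (bc : Int) (cur : List Char) :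
    segRef (',' :: t) bc cur
      = if bc = 0 then cur :: segRef t 0 [] else segRef t bc (cur ++ [',']) := by
  by_cases h : bc = 0 <;> simp [segRef_cons, h]

-- brace balance of a fragment
def balC (p : List Char) : Int := (p.count '{' : Int) - (p.count '}' : Int)

-- reference form of splitting on ',' (cur is the reversed pending fragment)
def splitC : List Char → List Char → List (List Char)
  | [], cur => [cur.reverse]
  | c :: t, cur => if c = ',' then cur.reverse :: splitC t [] else splitC t (c :: cur)

theorem countGo_single (ch : Char) : ∀ (fuel : Nat) (l : List Char) (acc : Nat),
    l.length ≤ fuel → PySem.Chars.count.go [ch] fuel l acc = acc + l.count ch := by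
  intro fuel
  induction fuel with
  | zero =>
    intro l acc h
    have : l = [] := by cases l <;> simp_all
    subst this; simp [PySem.Chars.count.go]
  | succ n ih =>
    intro l acc h
    cases l with
    | nil => simp [PySem.Chars.count.go]
    | cons c t =>
      by_cases hc : ch = c
      · subst hc
        simp only [PySem.Chars.count.go, List.isPrefixOf, BEq.rfl, Bool.and_true, if_pos,
          List.length_cons, List.length_nil, Nat.zero_add, List.drop_succ_cons, List.drop_zero]
        rw [ih t (acc + 1) (by simpa using Nat.le_of_succ_le_succ h)]
        simp
        omega
      · have hpre : [ch].isPrefixOf (c :: t) = false := by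
          simp [List.isPrefixOf, hc]
        simp only [PySem.Chars.count.go, hpre, Bool.false_eq_true, if_neg, not_false_iff]
        rw [ih t acc (by simpa using Nat.le_of_succ_le_succ h)]
        simp [Ne.symm hc]

theorem count_single (l : List Char) (ch : Char) : PySem.Chars.count l [ch] = l.count ch := by
  simp only [PySem.Chars.count, List.isEmpty_cons, Bool.false_eq_true, if_neg, not_false_iff]
  simpa using countGo_single ch l.length l 0 (le_refl _)

theorem bStep_eq (st : List (List Char) × List (List Char) × Int) (p : List Char) :
    bStep st p
      = if st.2.2 + balC p = 0
        then (st.1 ++ [PySem.Chars.join [','] (st.2.1 ++ [p])], [], 0)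
        else (st.1, st.2.1 ++ [p], st.2.2 + balC p) := by
  simp [bStep, count_single, balC]

theorem splitOnGo_eq : ∀ (fuel : Nat) (l cur : List Char) (acc : List (List Char)),
    l.length ≤ fuel →
    PySem.Chars.splitOn.go [','] fuel l cur acc = acc.reverse ++ splitC l cur := by
  intro fuel
  induction fuel with
  | zero =>
    intro l cur acc h
    have : l = [] := by cases l <;> simp_all
    subst this; simp [PySem.Chars.splitOn.go, splitC]
  | succ n ih =>
    intro l cur acc h
    cases l with
    | nil => simp [PySem.Chars.splitOn.go, splitC]
    | cons c t =>
      by_cases hc : c = ','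
      · subst hc
        have hpre : [','].isPrefixOf (',' :: t) = true := by simp [List.isPrefixOf]
        simp only [PySem.Chars.splitOn.go, hpre, if_pos, List.length_cons, List.length_nil,
          Nat.zero_add, List.drop_succ_cons, List.drop_zero]
        rw [ih t [] (cur.reverse :: acc) (by simpa using Nat.le_of_succ_le_succ h)]
        simp [splitC]
      · have hpre : [','].isPrefixOf (c :: t) = false := by
          simp [List.isPrefixOf]
          intro hco
          exact absurd hco.symm hc
        simp only [PySem.Chars.splitOn.go, hpre, Bool.false_eq_true, if_neg, not_false_iff]
        rw [ih t (c :: cur) acc (by simpa using Nat.le_of_succ_le_succ h)]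
        simp [splitC, hc]

theorem splitOn_comma_eq (l : List Char) : PySem.Chars.splitOn l [','] = splitC l [] := by
  simp only [PySem.Chars.splitOn]
  simpa using splitOnGo_eq (l.length + 1) l [] [] (by omega)

theorem splitC_ne_nil : ∀ (l cur : List Char), splitC l cur ≠ [] := by
  intro l
  induction l with
  | nil => intro cur; simp [splitC]
  | cons c t ih =>
    intro cur
    by_cases hc : c = ','
    · simp [splitC, hc]
    · simpa [splitC, hc] using ih (c :: cur)

theorem splitC_commafree : ∀ (l cur : List Char), ',' ∉ cur →
    ∀ p ∈ splitC l cur, ',' ∉ p := by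
  intro l
  induction l with
  | nil =>
    intro cur hcur p hp
    simp [splitC] at hp
    subst hp; simpa using hcur
  | cons c t ih =>
    intro cur hcur p hp
    by_cases hc : c = ','
    · subst hc
      simp [splitC] at hp
      rcases hp with hp | hp
      · subst hp; simpa using hcur
      · exact ih [] (by simp) p hp
    · simp [splitC, hc] at hp
      exact ih (c :: cur) (by simp [hcur, Ne.symm hc]) p hp

theorem join_comma_cons (p : List Char) (L : List (List Char)) (h : L ≠ []) :
    PySem.Chars.join [','] (p :: L) = p ++ ',' :: PySem.Chars.join [','] L := by
  cases L with
  | nil => exact absurd rfl h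
  | cons q M => simp [PySem.Chars.join_cons_cons]

theorem join_append_singleton : ∀ (buf : List (List Char)) (p : List Char),
    PySem.Chars.join [','] (buf ++ [p])
      = (if buf = [] then [] else PySem.Chars.join [','] buf ++ [',']) ++ p := by
  intro buf
  induction buf with
  | nil => intro p; simp [PySem.Chars.join_singleton]
  | cons b buf ih =>
    intro p
    rw [List.cons_append, join_comma_cons b (buf ++ [p]) (by simp), ih p]
    by_cases hb : buf = []
    · subst hb; simp [PySem.Chars.join_singleton]
    · rw [if_neg hb, if_neg (by simp), join_comma_cons b buf hb]
      simp

theorem join_splitC : ∀ (l cur : List Char),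
    PySem.Chars.join [','] (splitC l cur) = cur.reverse ++ l := by
  intro l
  induction l with
  | nil => intro cur; simp [splitC, PySem.Chars.join_singleton]
  | cons c t ih =>
    intro cur
    by_cases hc : c = ','
    · subst hc
      rw [splitC, if_pos rfl, join_comma_cons _ _ (splitC_ne_nil t []), ih []]
      simp
    · rw [splitC, if_neg hc, ih (c :: cur)]
      simp

theorem balC_cons (c : Char) (p : List Char) :
    balC (c :: p) = (if c = '{' then 1 else if c = '}' then -1 else 0) + balC p := by
  by_cases h1 : c = '{'
  · subst h1
    simp [balC]
    omega
  · by_cases h2 : c = '}'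
    · subst h2
      simp [balC, h1]
      omega
    · simp [balC, h1, h2]

theorem segRef_commafree : ∀ (p t : List Char) (bc : Int) (cur : List Char), ',' ∉ p →
    segRef (p ++ t) bc cur = segRef t (bc + balC p) (cur ++ p) := by
  intro p
  induction p with
  | nil => intro t bc cur _; simp [balC]
  | cons c q ih =>
    intro t bc cur hp
    have hc : c ≠ ',' := fun h => hp (by simp [h])
    rw [List.cons_append, segRef_cons, if_neg (by simp [hc]), ih t _ _ (fun h => hp (by simp [h])),
      balC_cons]
    simp only [List.append_assoc, List.singleton_append]
    ring_nf

-- B's fold over the remaining comma-free fragments computes segRef on the remaining characters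
theorem B_loop : ∀ (rest parts buf : List (List Char)) (bal : Int) (cur : List Char),
    rest ≠ [] → (∀ p ∈ rest, ',' ∉ p) →
    cur = (if buf = [] then [] else PySem.Chars.join [','] buf ++ [',']) →
    bFinish (rest.foldl bStep (parts, buf, bal))
      = parts ++ segRef (PySem.Chars.join [','] rest) bal cur := by
  intro rest
  induction rest with
  | nil => intro _ _ _ _ h; exact absurd rfl h
  | cons p rest ih =>
    intro parts buf bal cur _ hcf hcur
    have hpcf : ',' ∉ p := hcf p (by simp)
    have hjoin : cur ++ p = PySem.Chars.join [','] (buf ++ [p]) := by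
      rw [join_append_singleton, hcur]
    cases rest with
    | nil =>
      have hseg : segRef (PySem.Chars.join [','] [p]) bal cur = [cur ++ p] := by
        rw [PySem.Chars.join_singleton]
        have h := segRef_commafree p [] bal cur hpcf
        simpa [segRef_nil] using h
      rw [List.foldl_cons, List.foldl_nil, hseg, bStep_eq]
      by_cases hz : bal + balC p = 0
      · rw [if_pos hz]; simp [bFinish, hjoin]
      · rw [if_neg hz]; simp [bFinish, hjoin]
    | cons q rest' =>
      rw [join_comma_cons p (q :: rest') (by simp), segRef_commafree p _ bal cur hpcf,
        segRef_comma, List.foldl_cons, bStep_eq]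
      by_cases hz : bal + balC p = 0
      · rw [if_pos hz, if_pos hz,
          ih (parts ++ [PySem.Chars.join [','] (buf ++ [p])]) [] 0 [] (by simp)
            (fun r hr => hcf r (by simp [hr])) (by simp)]
        simp [hjoin]
      · rw [if_neg hz, if_neg hz,
          ih parts (buf ++ [p]) (bal + balC p) (cur ++ p ++ [',']) (by simp)
            (fun r hr => hcf r (by simp [hr])) (by rw [if_neg (by simp), ← hjoin])]

theorem alt_eq_segRef (string : String) :
    customSplit_py_alt string = (segRef string.toList 0 []).map String.ofList := by
  show (bFinish ((PySem.Chars.splitOn string.toList [',']).foldl bStep ([], [], 0))).map String.ofList = _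
  rw [splitOn_comma_eq,
    B_loop (splitC string.toList []) [] [] 0 [] (splitC_ne_nil _ [])
      (splitC_commafree _ [] (by simp)) (by simp),
    join_splitC]
  simp

-- slice extension by one character
theorem slice_ext (s : List Char) (last k : Nat) (hl : last ≤ k) (hk : k < s.length) :
    PySem.List.slice s (some (last : Int)) (some ((k : Int) + 1))
      = PySem.List.slice s (some (last : Int)) (some (k : Int)) ++ [s[k]] := by
  have h1 : ((k : Int) + 1) = ((k + 1 : Nat) : Int) := by push_cast; ring
  rw [h1, PySem.List.slice_natCast, PySem.List.slice_natCast]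
  have h2 : k + 1 - last = (k - last) + 1 := by omega
  rw [h2, List.take_add_one]
  congr 1
  rw [List.getElem?_drop]
  have h3 : last + (k - last) = k := by omega
  rw [h3, List.getElem?_eq_getElem hk]
  rfl

-- A's fold from position k computes segRef on the remaining characters
theorem A_loop (s : List Char) (m : Nat) : ∀ (k : Nat) (arr : List String) (bc : Int) (last : Nat),
    k ≤ s.length → s.length - k = m → last ≤ k →
    (let st := (PySem.List.pyRange (k : Int) (s.length : Int) 1).foldl (aStep s) (arr, bc, (last : Int));
     st.1 ++ [String.ofList (PySem.List.slice s (some st.2.2) none)])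
      = arr ++ (segRef (s.drop k) bc
          (PySem.List.slice s (some (last : Int)) (some (k : Int)))).map String.ofList := by
  induction m with
  | zero =>
    intro k arr bc last hk hm hl
    have hks : k = s.length := by omega
    subst hks
    have hr : PySem.List.pyRange ((s.length : Nat) : Int) ((s.length : Nat) : Int) 1 = [] := by
      simp [PySem.List.pyRange]
    rw [hr]
    simp only [List.foldl_nil, List.drop_length, segRef_nil, List.map_cons, List.map_nil]
    rw [PySem.List.slice_from_natCast, PySem.List.slice_natCast,
      List.take_of_length_le (by simp)]
  | succ n ih =>
    intro k arr bc last hk hm hl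
    have hks : k < s.length := by omega
    have hr : PySem.List.pyRange (k : Int) (s.length : Int) 1
        = (k : Int) :: PySem.List.pyRange ((k : Int) + 1) (s.length : Int) 1 :=
      PySem.List.pyRange_one_cons (by exact_mod_cast hks)
    have hget : PySem.List.pyGet? s (k : Int) = some s[k] := by
      simp [PySem.List.pyGet?_natCast, List.getElem?_eq_getElem hks]
    have hcast : ((k : Int) + 1) = ((k + 1 : Nat) : Int) := by push_cast; ring
    have hdrop : s.drop k = s[k] :: s.drop (k + 1) := List.drop_eq_getElem_cons hks
    have hcur : PySem.List.slice s (some (last : Int)) (some ((k : Int) + 1))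
        = PySem.List.slice s (some (last : Int)) (some (k : Int)) ++ [s[k]] :=
      slice_ext s last k hl hks
    rw [hr, List.foldl_cons, hdrop]
    by_cases hcomma : s[k] = ',' ∧ bc = 0
    · have hstep : aStep s (arr, bc, (last : Int)) (k : Int)
          = (arr ++ [String.ofList (PySem.List.slice s (some (last : Int)) (some (k : Int)))],
             bc, (k : Int) + 1) := by
        simp [aStep, hget, hcomma.1, hcomma.2]
      rw [hstep, hcast, ih (k + 1) _ bc (k + 1) (by omega) (by omega) (le_refl _)]
      rw [segRef_cons, if_pos ⟨hcomma.1, hcomma.2⟩, hcomma.2]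
      have hempty : PySem.List.slice s (some ((k + 1 : Nat) : Int)) (some ((k + 1 : Nat) : Int))
          = ([] : List Char) := by
        rw [PySem.List.slice_natCast]; simp
      rw [hempty]
      simp
    · by_cases h1 : s[k] = '{'
      · have hstep : aStep s (arr, bc, (last : Int)) (k : Int) = (arr, bc + 1, (last : Int)) := by
          simp [aStep, hget, h1]
        rw [hstep, hcast, ih (k + 1) arr (bc + 1) last (by omega) (by omega) (by omega),
          segRef_cons]
        simp [hcur, h1]
      · by_cases h2 : s[k] = '}'
        · have hstep : aStep s (arr, bc, (last : Int)) (k : Int) = (arr, bc - 1, (last : Int)) := by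
            simp [aStep, hget, h2]
          rw [hstep, hcast, ih (k + 1) arr (bc - 1) last (by omega) (by omega) (by omega),
            segRef_cons]
          simp [hcur, h2, sub_eq_add_neg]
        · have hstep : aStep s (arr, bc, (last : Int)) (k : Int) = (arr, bc, (last : Int)) := by
            simp only [aStep]
            rw [if_neg, if_neg, if_neg]
            · simp [hget, h2]
            · simp [hget, h1]
            · intro h
              rcases h with ⟨ha, hb⟩
              rw [hget, Option.some_inj] at ha
              exact hcomma ⟨ha, hb⟩
          rw [hstep, hcast, ih (k + 1) arr bc last (by omega) (by omega) (by omega),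
            segRef_cons, if_neg hcomma]
          simp [hcur, h1, h2]

theorem a_eq_segRef (string : String) :
    customSplit_py string = (segRef string.toList 0 []).map String.ofList := by
  unfold customSplit_py
  have h := A_loop string.toList string.toList.length 0 [] 0 0 (by omega) (by omega) (le_refl _)
  simp only [Nat.cast_zero] at h
  rw [h]
  have h0 : PySem.List.slice string.toList (some (0 : Int)) (some (0 : Int)) = ([] : List Char) := by
    have := PySem.List.slice_natCast (xs := string.toList) (a := 0) (b := 0)
    simpa using this
  rw [List.drop_zero, h0]
  simp

-- ===== VERDICT (by name: the statement is the Claim_ definition above) =====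
theorem customSplit_py_spec : Claim_equal_customSplit_py := by
  intro string _
  unfold Spec_customSplit_py
  rw [a_eq_segRef, alt_eq_segRef]
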